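-- pv_equiv track=rewrite | github.com/Tulki/advent | 2020/day06.py | countAnyoneYes
-- ===== SOURCE A (Python) =====
-- def countAnyoneYes(declarations, unionSet):
--     # End of declarations list, flush the last group's yes count.
--     if len(declarations) == 0:
--         return len(unionSet)
--     line = declarations[0]
--     # End of a group in the declarations list, flush the group's yes count and continue.
--     if line == '':
--         return len(unionSet) + countAnyoneYes(declarations[1:], set())
--
--     for char in line:
--         unionSet.add(char)
--
--     return countAnyoneYes(declarations[1:], unionSet)
-- ===== SOURCE B (Python) =====
-- def countAnyoneYes(declarations, unionSet):
--     total = 0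
--     cur = unionSet.copy()
--     for line in declarations:
--         if line == '':
--             total += len(cur)
--             cur = set()
--         else:
--             cur.update(line)
--     return total + len(cur)
-- ===== Notes on version B (the rewrite author's own statement) =====
-- stated objective: faster
-- what changed: Replaced the O(n^2) recursion (which slices declarations[1:] on every call and can overflow the recursion stack) by a single iterative pass that keeps a running total and the current group's set.
import Mathlib
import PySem

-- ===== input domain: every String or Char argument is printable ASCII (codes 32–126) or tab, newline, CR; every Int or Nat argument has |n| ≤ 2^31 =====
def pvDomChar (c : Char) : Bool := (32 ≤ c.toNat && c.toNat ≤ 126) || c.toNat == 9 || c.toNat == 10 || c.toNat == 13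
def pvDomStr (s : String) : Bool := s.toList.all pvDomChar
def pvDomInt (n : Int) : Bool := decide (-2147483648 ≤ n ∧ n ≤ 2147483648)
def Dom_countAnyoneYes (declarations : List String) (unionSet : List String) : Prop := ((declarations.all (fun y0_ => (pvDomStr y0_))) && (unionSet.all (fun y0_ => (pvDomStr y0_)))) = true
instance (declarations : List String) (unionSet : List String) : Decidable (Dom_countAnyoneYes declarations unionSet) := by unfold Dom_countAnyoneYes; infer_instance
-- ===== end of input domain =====

-- B replaces A's recursion (which copies declarations[1:] at every step) by one iterative pass with a
-- running total; equivalence is about the RETURN value only (A mutates its unionSet argument in place).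

-- ===== PORT A =====
def countAnyoneYes (declarations : List String) (unionSet : List String) : Int :=
  match declarations with
  | [] => (unionSet.length : Int)
  | line :: rest =>
    if line = "" then
      (unionSet.length : Int) + countAnyoneYes rest PySem.Set.empty
    else
      countAnyoneYes rest
        (line.toList.foldl (fun s c => PySem.Set.add s (String.singleton c)) unionSet)

-- ===== PORT B =====
def countAnyoneYes_alt (declarations : List String) (unionSet : List String) : Int :=
  let st := declarations.foldl
    (fun (st : Int × PySem.Set String) line =>
      if line = "" then (st.1 + (st.2.length : Int), PySem.Set.empty)
      else (st.1, PySem.Set.update st.2 (line.toList.map String.singleton)))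
    ((0 : Int), unionSet)
  st.1 + (st.2.length : Int)

-- ===== PRECONDITION & SPEC =====
def Spec_countAnyoneYes (declarations : List String) (unionSet : List String) (out : Int) : Prop := out = countAnyoneYes_alt declarations unionSet
instance (declarations : List String) (unionSet : List String) (out : Int) : Decidable (Spec_countAnyoneYes declarations unionSet out) := by unfold Spec_countAnyoneYes; infer_instance

-- ===== CLAIM (what is proved, stated in full; the proofs are below) =====
def Claim_equal_countAnyoneYes : Prop := ∀ (declarations : List String) (unionSet : List String), Dom_countAnyoneYes declarations unionSet → Spec_countAnyoneYes declarations unionSet (countAnyoneYes declarations unionSet)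

-- ===== LEMMAS AND PROOFS =====

-- loop invariant: the fold's total-so-far plus the size of the current set equals
-- `total + countAnyoneYes rest cur`.
theorem countAnyoneYes_fold_inv (declarations : List String) (total : Int) (cur : List String) :
    (let st := declarations.foldl
      (fun (st : Int × PySem.Set String) line =>
        if line = "" then (st.1 + (st.2.length : Int), PySem.Set.empty)
        else (st.1, PySem.Set.update st.2 (line.toList.map String.singleton)))
      (total, cur)
     st.1 + (st.2.length : Int)) = total + countAnyoneYes declarations cur := by
  induction declarations generalizing total cur with
  | nil => simp [countAnyoneYes]
  | cons line rest ih =>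
    by_cases h : line = ""
    · subst h
      simp only [List.foldl_cons, countAnyoneYes, reduceIte]
      rw [ih]
      ring
    · simp only [List.foldl_cons, countAnyoneYes, if_neg h]
      rw [ih]
      congr 1
      simp [PySem.Set.update, List.foldl_map]

-- ===== VERDICT (by name: the statement is the Claim_ definition above) =====
theorem countAnyoneYes_spec : Claim_equal_countAnyoneYes := by
  intro declarations unionSet _
  unfold Spec_countAnyoneYes countAnyoneYes_alt
  rw [countAnyoneYes_fold_inv]
  ring
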